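-- pv_equiv track=rewrite | github.com/bhagdht/DraftHelper | sleeper_draft_assistant/strategy.py | _count_starters
-- ===== SOURCE A (Python) =====
-- from typing import Dict, Any, List, Tuple
--
-- def _count_starters(roster_positions: List[str]) -> Dict[str, int]:
--     """Count required starters by POS from league roster positions."""
--     # Example roster_positions: ["QB","RB","RB","WR","WR","TE","FLEX","K","DST","BN","BN","BN"...]
--     starters = {"QB": 0, "RB": 0, "WR": 0, "TE": 0, "DST": 0, "K": 0}
--     for pos in roster_positions:
--         p = (pos or "").upper()
--         if p in starters:
--             starters[p] += 1
--         elif p in ("WR/RB", "WR/RB/TE", "FLEX"):  # FLEX can be RB/WR/TE; handle later by “need anywhere”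
--             # We’ll treat flex dynamically (see below) — not counted here
--             pass
--     return starters
-- ===== SOURCE B (Python) =====
-- from typing import Dict, List
--
-- def _count_starters(roster_positions: List[str]) -> Dict[str, int]:
--     """Count required starters by POS: sort normalized positions, run-length
--     encode the sorted list, then read off the six fixed keys."""
--     ordered = sorted((pos or "").upper() for pos in roster_positions)
--     runs = {}
--     i = 0
--     n = len(ordered)
--     while i < n:
--         j = i
--         while j < n and ordered[j] == ordered[i]:
--             j += 1
--         runs[ordered[i]] = j - i
--         i = j
--     return {k: runs.get(k, 0) for k in ("QB", "RB", "WR", "TE", "DST", "K")}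
-- ===== Notes on version B (the rewrite author's own statement) =====
-- stated objective: alternative
-- what changed: B sorts the normalized positions, run-length encodes the sorted list with an index-advancing while loop, and then reads the six fixed keys out of the run table, instead of A's single-pass membership-test-and-increment over a pre-seeded dict (A's no-op FLEX branch is dropped).
import Mathlib
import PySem

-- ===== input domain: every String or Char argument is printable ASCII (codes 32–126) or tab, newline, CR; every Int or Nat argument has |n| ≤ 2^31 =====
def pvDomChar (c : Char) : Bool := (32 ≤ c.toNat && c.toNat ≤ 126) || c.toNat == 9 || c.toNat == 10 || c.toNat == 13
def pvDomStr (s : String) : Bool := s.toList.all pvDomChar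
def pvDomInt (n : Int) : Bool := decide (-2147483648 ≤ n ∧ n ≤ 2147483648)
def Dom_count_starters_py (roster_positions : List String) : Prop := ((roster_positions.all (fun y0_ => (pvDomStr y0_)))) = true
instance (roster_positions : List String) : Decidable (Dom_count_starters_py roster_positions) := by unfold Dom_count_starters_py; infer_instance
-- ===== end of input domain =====

-- B replaces A's single-pass membership-test-and-increment tally by sort → run-length
-- encoding of the sorted list → read off the six fixed keys (alternative algorithm, same result).

-- p = (pos or "").upper()
def pvNorm (pos : String) : String := PySem.Str.upper (if pos = "" then "" else pos)

-- ===== PORT A =====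
-- A's loop body: if p in starters: starters[p] += 1; elif p in ("WR/RB","WR/RB/TE","FLEX"): pass (no-op)
def pvStep (starters : PySem.Dict String Int) (pos : String) : PySem.Dict String Int :=
  if starters.contains (pvNorm pos) then starters.modify (pvNorm pos) 0 (· + 1) else starters

def count_starters_py (roster_positions : List String) : List (String × Int) :=
  (roster_positions.foldl pvStep
    (PySem.Dict.ofList [("QB", 0), ("RB", 0), ("WR", 0), ("TE", 0), ("DST", 0), ("K", 0)])).items

-- ===== PORT B =====
-- B's while loops: advance j over the run of elements equal to ordered[i], record the run
-- length, continue from j.  Ported as recursion on the sorted list: one step consumes one run.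
def pvRle (ys : List String) (runs : PySem.Dict String Int) : PySem.Dict String Int :=
  match ys with
  | [] => runs
  | x :: rest =>
      pvRle (rest.dropWhile (fun y => y == x))
            (runs.insert x ((((x :: rest).takeWhile (fun y => y == x)).length : Int)))
termination_by ys.length
decreasing_by
  exact Nat.lt_succ_of_le (List.length_dropWhile_le _ _)

def count_starters_py_alt (roster_positions : List String) : List (String × Int) :=
  let ordered := PySem.List.sorted (roster_positions.map pvNorm) (fun s => s) false
  let runs := pvRle ordered PySem.Dict.empty
  -- dict comprehension over the six distinct literal keys
  ["QB", "RB", "WR", "TE", "DST", "K"].map (fun k => (k, runs.getD k 0))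

-- ===== PRECONDITION & SPEC =====
def Spec_count_starters_py (roster_positions : List String) (out : List (String × Int)) : Prop := out = count_starters_py_alt roster_positions
instance (roster_positions : List String) (out : List (String × Int)) : Decidable (Spec_count_starters_py roster_positions out) := by unfold Spec_count_starters_py; infer_instance

-- ===== CLAIM (what is proved, stated in full; the proofs are below) =====
def Claim_equal_count_starters_py : Prop := ∀ (roster_positions : List String), Dom_count_starters_py roster_positions → Spec_count_starters_py roster_positions (count_starters_py roster_positions)

-- ===== LEMMAS AND PROOFS =====

-- A-side: the fold only increments existing keys, so keys are fixed and each key ends at its count.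
lemma pvStep_keys (d : PySem.Dict String Int) (pos : String) : (pvStep d pos).keys = d.keys := by
  unfold pvStep
  split
  · rename_i h
    simp [PySem.Dict.keys_modify, PySem.Dict.keys_insert_of_contains, h]
  · rfl

lemma pvFold_keys (xs : List String) (d : PySem.Dict String Int) :
    (xs.foldl pvStep d).keys = d.keys := by
  induction xs generalizing d with
  | nil => rfl
  | cons x xs ih => simpa [List.foldl, pvStep_keys] using ih (pvStep d x)

lemma pvFold_getD (xs : List String) (d : PySem.Dict String Int) (k : String) (hk : k ∈ d.keys) :
    (xs.foldl pvStep d).getD k 0 = d.getD k 0 + ((xs.map pvNorm).count k : Int) := by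
  induction xs generalizing d with
  | nil => simp
  | cons x xs ih =>
    have hk' : k ∈ (pvStep d x).keys := by rw [pvStep_keys]; exact hk
    rw [List.foldl_cons, ih (pvStep d x) hk']
    unfold pvStep
    by_cases hc : d.contains (pvNorm x) = true
    · simp only [hc, if_true]
      rw [PySem.Dict.getD_modify]
      by_cases he : k = pvNorm x
      · subst he; simp; ring
      · simp [he, Ne.symm he]
    · simp only [hc]
      have hne : pvNorm x ≠ k := by
        intro h; apply hc
        rw [h]; exact (PySem.Dict.contains_iff_mem_keys ..).mpr hk
      simp [hne]

-- B-side: on a sorted list every run of equal elements is contiguous, so the run-length pass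
-- records exactly the multiplicity of each element.
lemma pvRle_getD (k : String) (n : Nat) (ys : List String) (hlen : ys.length ≤ n)
    (hs : ys.Pairwise (· ≤ ·)) (d : PySem.Dict String Int) :
    (pvRle ys d).getD k 0 = if k ∈ ys then ((ys.count k : Nat) : Int) else d.getD k 0 := by
  induction n generalizing ys d with
  | zero =>
    have : ys = [] := List.length_eq_zero_iff.mp (Nat.le_zero.mp hlen)
    subst this; simp [pvRle]
  | succ n ih =>
    match ys with
    | [] => simp [pvRle]
    | x :: rest =>
      rw [pvRle]
      obtain ⟨t, ht⟩ : ∃ t, rest.dropWhile (fun y => y == x) = t := ⟨_, rfl⟩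
      obtain ⟨r, hr⟩ : ∃ r, rest.takeWhile (fun y => y == x) = r := ⟨_, rfl⟩
      have htake : (x :: rest).takeWhile (fun y => y == x) = x :: r := by
        simp [hr]
      rw [ht, htake]
      have hsplit : rest = r ++ t := by rw [← hr, ← ht, List.takeWhile_append_dropWhile]
      have hrx : ∀ e ∈ r, e = x := by
        intro e he
        have := List.mem_takeWhile_imp (hr ▸ he)
        simpa using this
      have hxle : ∀ e ∈ rest, x ≤ e := (List.pairwise_cons.mp hs).1
      have hrests : rest.Pairwise (· ≤ ·) := (List.pairwise_cons.mp hs).2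
      have hts : t.Pairwise (· ≤ ·) := hrests.sublist (ht ▸ List.dropWhile_sublist _)
      have htmem : ∀ e ∈ t, e ∈ rest := fun e he => by
        rw [hsplit]; exact List.mem_append_right _ he
      have htne : ∀ e ∈ t, e ≠ x := by
        intro e he heq
        cases h0 : t with
        | nil => rw [h0] at he; simp at he
        | cons t0 t' =>
          have hp : (t0 == x) = false := by
            have := List.head?_dropWhile_not (fun y => y == x) rest
            rw [ht, h0] at this; simpa using this
          have ht0x : t0 ≠ x := by simpa using hp
          rw [h0] at he
          rcases List.mem_cons.mp he with h1 | h1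
          · exact ht0x (h1 ▸ heq)
          · have h2 : t0 ≤ e := (List.pairwise_cons.mp (h0 ▸ hts)).1 e h1
            have h3 : x ≤ t0 := hxle t0 (htmem t0 (h0 ▸ List.mem_cons_self))
            exact ht0x (le_antisymm (heq ▸ h2) h3)
      have hrcount_x : r.count x = r.length := by
        rw [List.count_eq_length]; intro e he; exact (hrx e he).symm
      have htcount_x : t.count x = 0 := by
        rw [List.count_eq_zero]; intro hx; exact htne x hx rfl
      have hlen' : t.length ≤ n := by
        have h1 : t.length ≤ rest.length := ht ▸ List.length_dropWhile_le _ _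
        have h2 : rest.length + 1 ≤ n + 1 := by simpa using hlen
        omega
      rw [ih t hlen' hts]
      by_cases hkt : k ∈ t
      · have hknx : k ≠ x := htne k hkt
        have hkmem : k ∈ x :: rest := List.mem_cons_of_mem _ (htmem k hkt)
        simp only [hkt, if_true, hkmem, if_true]
        have : (x :: rest).count k = t.count k := by
          rw [List.count_cons, hsplit, List.count_append]
          have hrk : r.count k = 0 := by
            rw [List.count_eq_zero]; intro hk'; exact hknx (hrx k hk')
          simp [hrk, Ne.symm hknx]
        rw [this]
      · simp only [hkt, if_false]
        rw [PySem.Dict.getD_insert]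
        by_cases hkx : k = x
        · subst hkx
          have hkmem : k ∈ k :: rest := List.mem_cons_self
          simp only [hkmem, if_true]
          have : (k :: rest).count k = r.length + 1 := by
            rw [List.count_cons, hsplit, List.count_append, hrcount_x, htcount_x]
            simp
          rw [this]
          simp
        · have hkmem : k ∉ x :: rest := by
            intro hk'
            rcases List.mem_cons.mp hk' with h1 | h1
            · exact hkx h1
            · rw [hsplit] at h1
              rcases List.mem_append.mp h1 with h2 | h2
              · exact hkx (hrx k h2)
              · exact hkt h2
          simp [hkx, hkmem]

-- ===== VERDICT (by name: the statement is the Claim_ definition above) =====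
theorem count_starters_py_spec : Claim_equal_count_starters_py := by
  intro roster_positions _
  unfold Spec_count_starters_py count_starters_py count_starters_py_alt
  set d0 : PySem.Dict String Int := PySem.Dict.ofList [("QB", 0), ("RB", 0), ("WR", 0), ("TE", 0), ("DST", 0), ("K", 0)] with hd0
  have hkeys : d0.keys = ["QB", "RB", "WR", "TE", "DST", "K"] := by rw [hd0]; rfl
  have hnd : (roster_positions.foldl pvStep d0).keys.Nodup := by
    rw [pvFold_keys, hkeys]; decide
  rw [PySem.Dict.items_eq_map_keys _ hnd 0, pvFold_keys, hkeys]
  refine List.map_congr_left ?_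
  intro k hk
  rw [pvFold_getD _ _ _ (by rw [hkeys]; exact hk)]
  have h0 : d0.getD k 0 = 0 := by fin_cases hk <;> rfl
  have hsorted : (PySem.List.sorted (roster_positions.map pvNorm) (fun s => s) false).Pairwise (· ≤ ·) := by
    have := PySem.List.sorted_pairwise (roster_positions.map pvNorm) (fun s => s)
    simpa using this
  rw [pvRle_getD k _ _ le_rfl hsorted PySem.Dict.empty]
  have hperm : (PySem.List.sorted (roster_positions.map pvNorm) (fun s => s) false).Perm (roster_positions.map pvNorm) := PySem.List.sorted_perm ..
  have hco := hperm.count_eq k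
  by_cases hmem : k ∈ PySem.List.sorted (roster_positions.map pvNorm) (fun s => s) false
  · simp [hmem, hco, h0]
  · have hz : (roster_positions.map pvNorm).count k = 0 := by
      rw [← hco, List.count_eq_zero]; exact hmem
    simp [hmem, h0, hz]
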